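-- pv_equiv track=rewrite | github.com/khuushichand/aiml-project | tldw_Server_API/tests/e2e/fixtures.py | validate_sanitization
-- ===== SOURCE A (Python) =====
-- def validate_sanitization(original: str, sanitized: str, payload_type: str) -> bool:
--     """Validate that a malicious payload was properly sanitized."""
--     if payload_type == 'sql_injection':
--         dangerous_patterns = ["DROP", "DELETE", "UNION", "SELECT", "--"]
--         for pattern in dangerous_patterns:
--             if pattern.upper() in sanitized.upper():
--                 return False
--
--     elif payload_type == 'xss':
--         dangerous_patterns = ["<script", "onerror", "javascript:", "<iframe"]
--         for pattern in dangerous_patterns: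
--             if pattern.lower() in sanitized.lower():
--                 return False
--
--     elif payload_type == 'path_traversal':
--         if ".." in sanitized or "etc/passwd" in sanitized:
--             return False
--
--     return True
-- ===== SOURCE B (Python) =====
-- # Different algorithm: instead of per-pattern `in` substring tests, normalize the
-- # text once and run a hand-written multi-pattern scanner that walks every position
-- # and compares the slice there against the pre-normalized patterns of the category.
-- _RULES = {
--     'sql_injection': (str.upper, ("DROP", "DELETE", "UNION", "SELECT", "--")),
--     'xss': (str.lower, ("<script", "onerror", "javascript:", "<iframe")),
--     'path_traversal': (str, ("..", "etc/passwd")),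
-- }
--
--
-- def validate_sanitization(original: str, sanitized: str, payload_type: str) -> bool:
--     """Validate that a malicious payload was properly sanitized."""
--     rule = _RULES.get(payload_type)
--     if rule is None:
--         return True
--     norm, patterns = rule
--     text = norm(sanitized)
--     for i in range(len(text) + 1):
--         for p in patterns:
--             if text[i:i + len(p)] == p:
--                 return False
--     return True
-- ===== Notes on version B (the rewrite author's own statement) =====
-- stated objective: alternative
-- what changed: Replaced per-pattern built-in substring ('in') tests in a three-branch if/elif by a hand-written multi-pattern scanner: a rules table selects pre-normalized patterns and a normalizer, the text is normalized once, and one explicit loop over every position compares the slice there against each pattern.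
import Mathlib
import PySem

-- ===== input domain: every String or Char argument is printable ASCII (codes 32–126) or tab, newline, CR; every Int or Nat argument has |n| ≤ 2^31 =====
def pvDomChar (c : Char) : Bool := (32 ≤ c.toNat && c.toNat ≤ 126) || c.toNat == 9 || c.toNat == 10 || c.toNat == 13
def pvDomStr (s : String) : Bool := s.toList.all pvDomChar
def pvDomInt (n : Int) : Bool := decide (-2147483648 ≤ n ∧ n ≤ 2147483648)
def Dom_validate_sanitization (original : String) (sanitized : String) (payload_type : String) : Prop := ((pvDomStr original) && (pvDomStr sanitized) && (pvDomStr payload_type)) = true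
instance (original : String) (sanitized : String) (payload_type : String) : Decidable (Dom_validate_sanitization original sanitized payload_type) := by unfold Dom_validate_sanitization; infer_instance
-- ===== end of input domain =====

-- B replaces A's per-pattern `in` substring tests with a hand-written multi-pattern
-- scanner: normalize the text once, walk every position, compare the slice there
-- against the pre-normalized patterns of the category (objective: alternative).

-- ===== PORT A =====
-- 'for pattern in dangerous_patterns: if pattern.upper() in sanitized.upper(): return False'
def pvSqlLoop (patterns : List String) (sanitized : String) : Bool :=
  match patterns with
  | [] => true
  | p :: ps =>
    if PySem.Str.isIn (PySem.Str.upper p) (PySem.Str.upper sanitized) then false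
    else pvSqlLoop ps sanitized

-- 'for pattern in dangerous_patterns: if pattern.lower() in sanitized.lower(): return False'
def pvXssLoop (patterns : List String) (sanitized : String) : Bool :=
  match patterns with
  | [] => true
  | p :: ps =>
    if PySem.Str.isIn (PySem.Str.lower p) (PySem.Str.lower sanitized) then false
    else pvXssLoop ps sanitized

def validate_sanitization (original : String) (sanitized : String) (payload_type : String) : Bool :=
  if payload_type == "sql_injection" then
    pvSqlLoop ["DROP", "DELETE", "UNION", "SELECT", "--"] sanitized
  else if payload_type == "xss" then
    pvXssLoop ["<script", "onerror", "javascript:", "<iframe"] sanitized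
  else if payload_type == "path_traversal" then
    if PySem.Str.isIn ".." sanitized || PySem.Str.isIn "etc/passwd" sanitized then false
    else true
  else true

-- ===== PORT B =====
-- module-level _RULES dict: payload_type ↦ (normalizer, pre-normalized patterns)
def pvRulesB : PySem.Dict String ((String → List Char) × List (List Char)) :=
  PySem.Dict.mk
    [("sql_injection",
        (fun s => PySem.Chars.upper s.toList,
         ["DROP".toList, "DELETE".toList, "UNION".toList, "SELECT".toList, "--".toList])),
     ("xss",
        (fun s => PySem.Chars.lower s.toList,
         ["<script".toList, "onerror".toList, "javascript:".toList, "<iframe".toList])),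
     ("path_traversal",
        (fun s => s.toList,
         ["..".toList, "etc/passwd".toList]))]

-- inner 'for p in patterns: if text[i:i+len(p)] == p: return False' at one position i
def pvHit (text : List Char) (pats : List (List Char)) (i : Nat) : Bool :=
  pats.any (fun p => PySem.List.slice text (some (i : Int)) (some ((i : Int) + (p.length : Int))) == p)

-- outer 'for i in range(len(text) + 1): …' with early return; fuel = remaining positions
def pvScan (text : List Char) (pats : List (List Char)) (i fuel : Nat) : Bool :=
  match fuel with
  | 0 => true
  | f + 1 => if pvHit text pats i then false else pvScan text pats (i + 1) f

def validate_sanitization_alt (original : String) (sanitized : String) (payload_type : String) : Bool :=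
  match pvRulesB.get? payload_type with
  | none => true
  | some (norm, pats) =>
    let text := norm sanitized
    pvScan text pats 0 (text.length + 1)

-- ===== PRECONDITION & SPEC =====
def Spec_validate_sanitization (original : String) (sanitized : String) (payload_type : String) (out : Bool) : Prop := out = validate_sanitization_alt original sanitized payload_type
instance (original : String) (sanitized : String) (payload_type : String) (out : Bool) : Decidable (Spec_validate_sanitization original sanitized payload_type out) := by unfold Spec_validate_sanitization; infer_instance

-- ===== CLAIM =====
def Claim_equal_validate_sanitization : Prop := ∀ (original : String) (sanitized : String) (payload_type : String), Dom_validate_sanitization original sanitized payload_type → Spec_validate_sanitization original sanitized payload_type (validate_sanitization original sanitized payload_type)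

-- ===== LEMMAS AND PROOFS =====
-- A position hits iff some pattern is a prefix of the text dropped at that position.
theorem pvHit_iff (text : List Char) (pats : List (List Char)) (i : Nat) :
    pvHit text pats i = true ↔ ∃ p ∈ pats, p <+: text.drop i := by
  unfold pvHit
  simp only [List.any_eq_true, beq_iff_eq, PySem.List.slice_natCast_add]
  constructor
  · rintro ⟨p, hp, h⟩
    exact ⟨p, hp, h ▸ List.take_prefix _ _⟩
  · rintro ⟨p, hp, h⟩
    exact ⟨p, hp, (List.prefix_iff_eq_take.mp h).symm⟩

-- The scanner returns false iff some position in its window hits.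
theorem pvScan_false_iff (text : List Char) (pats : List (List Char)) :
    ∀ (fuel i : Nat), pvScan text pats i fuel = false ↔
      ∃ j, i ≤ j ∧ j < i + fuel ∧ pvHit text pats j = true := by
  intro fuel
  induction fuel with
  | zero => intro i; simp [pvScan]; omega
  | succ f ih =>
    intro i
    by_cases h : pvHit text pats i = true
    · simp only [pvScan, h, if_true]
      exact ⟨fun _ => ⟨i, le_refl i, by omega, h⟩, fun _ => trivial⟩
    · have h' : pvHit text pats i = false := by simpa using h
      simp only [pvScan, h', Bool.false_eq_true, if_false, ih (i + 1)]
      constructor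
      · rintro ⟨j, h1, h2, h3⟩; exact ⟨j, by omega, by omega, h3⟩
      · rintro ⟨j, h1, h2, h3⟩
        refine ⟨j, ?_, by omega, h3⟩
        rcases Nat.eq_or_lt_of_le h1 with rfl | hlt
        · rw [h3] at h'; exact absurd h' (by simp)
        · omega

-- Full scan = negated "some pattern occurs as a substring".
theorem pvScan_eq_not_any (text : List Char) (pats : List (List Char)) :
    pvScan text pats 0 (text.length + 1)
      = !(pats.any (fun p => PySem.Chars.isIn p text)) := by
  have key : pvScan text pats 0 (text.length + 1) = false ↔
      (pats.any (fun p => PySem.Chars.isIn p text)) = true := by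
    rw [pvScan_false_iff]
    simp only [List.any_eq_true]
    constructor
    · rintro ⟨j, -, -, hj⟩
      obtain ⟨p, hp, hpre⟩ := (pvHit_iff text pats j).mp hj
      exact ⟨p, hp, (PySem.Chars.exists_prefix_drop_iff_isIn p text).mp ⟨j, hpre⟩⟩
    · rintro ⟨p, hp, hin⟩
      obtain ⟨j, hpre⟩ := (PySem.Chars.exists_prefix_drop_iff_isIn p text).mpr hin
      by_cases hj : j ≤ text.length
      · exact ⟨j, Nat.zero_le _, by omega, (pvHit_iff text pats j).mpr ⟨p, hp, hpre⟩⟩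
      · have hnil : text.drop j = [] := List.drop_eq_nil_of_le (by omega)
        have : p <+: text.drop text.length := by
          rw [List.drop_length]; rw [hnil] at hpre; exact hpre
        exact ⟨text.length, Nat.zero_le _, by omega,
          (pvHit_iff text pats text.length).mpr ⟨p, hp, this⟩⟩
  cases hb : pats.any (fun p => PySem.Chars.isIn p text)
  · cases hs : pvScan text pats 0 (text.length + 1)
    · exact absurd (key.mp hs) (by simp [hb])
    · rfl
  · simp [key.mpr hb]

-- A's early-return loop over patterns equals the negated any-scan.
theorem pvSqlLoop_eq_any (patterns : List String) (sanitized : String) :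
    pvSqlLoop patterns sanitized
      = !(patterns.any (fun p => PySem.Str.isIn (PySem.Str.upper p) (PySem.Str.upper sanitized))) := by
  induction patterns with
  | nil => rfl
  | cons p ps ih =>
    simp only [pvSqlLoop, List.any_cons]
    cases h : PySem.Str.isIn (PySem.Str.upper p) (PySem.Str.upper sanitized) <;> simp [ih]

theorem pvXssLoop_eq_any (patterns : List String) (sanitized : String) :
    pvXssLoop patterns sanitized
      = !(patterns.any (fun p => PySem.Str.isIn (PySem.Str.lower p) (PySem.Str.lower sanitized))) := by
  induction patterns with
  | nil => rfl
  | cons p ps ih =>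
    simp only [pvXssLoop, List.any_cons]
    cases h : PySem.Str.isIn (PySem.Str.lower p) (PySem.Str.lower sanitized) <;> simp [ih]

-- ===== VERDICT =====
theorem validate_sanitization_spec : Claim_equal_validate_sanitization := by
  intro original sanitized payload_type _
  unfold Spec_validate_sanitization validate_sanitization validate_sanitization_alt
  by_cases h1 : payload_type = "sql_injection"
  · subst h1
    simp only [pvRulesB, PySem.Dict.get?_mk_cons, beq_self_eq_true, if_true,
      pvSqlLoop_eq_any, pvScan_eq_not_any]
    simp [List.any_cons,
      show PySem.Chars.upper ['D', 'R', 'O', 'P'] = ['D', 'R', 'O', 'P'] from by decide,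
      show PySem.Chars.upper ['D', 'E', 'L', 'E', 'T', 'E'] = ['D', 'E', 'L', 'E', 'T', 'E'] from by decide,
      show PySem.Chars.upper ['U', 'N', 'I', 'O', 'N'] = ['U', 'N', 'I', 'O', 'N'] from by decide,
      show PySem.Chars.upper ['S', 'E', 'L', 'E', 'C', 'T'] = ['S', 'E', 'L', 'E', 'C', 'T'] from by decide,
      show PySem.Chars.upper ['-', '-'] = ['-', '-'] from by decide]
  · by_cases h2 : payload_type = "xss"
    · subst h2
      simp only [pvRulesB, PySem.Dict.get?_mk_cons, beq_self_eq_true, if_true,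
        pvXssLoop_eq_any, pvScan_eq_not_any]
      simp [List.any_cons, h1,
        show PySem.Chars.lower ['<', 's', 'c', 'r', 'i', 'p', 't'] = ['<', 's', 'c', 'r', 'i', 'p', 't'] from by decide,
        show PySem.Chars.lower ['o', 'n', 'e', 'r', 'r', 'o', 'r'] = ['o', 'n', 'e', 'r', 'r', 'o', 'r'] from by decide,
        show PySem.Chars.lower ['j', 'a', 'v', 'a', 's', 'c', 'r', 'i', 'p', 't', ':'] = ['j', 'a', 'v', 'a', 's', 'c', 'r', 'i', 'p', 't', ':'] from by decide,
        show PySem.Chars.lower ['<', 'i', 'f', 'r', 'a', 'm', 'e'] = ['<', 'i', 'f', 'r', 'a', 'm', 'e'] from by decide]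
    · by_cases h3 : payload_type = "path_traversal"
      · subst h3
        simp only [pvRulesB, PySem.Dict.get?_mk_cons, beq_self_eq_true, if_true,
          pvScan_eq_not_any]
        cases ha : PySem.Str.isIn ".." sanitized <;>
          cases hb : PySem.Str.isIn "etc/passwd" sanitized <;>
            simp_all
      · have : pvRulesB.get? payload_type = none := by
          simp [pvRulesB, PySem.Dict.get?, beq_iff_eq, Ne.symm h1, Ne.symm h2, Ne.symm h3]
        simp [h1, h2, h3, this]
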